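-- pv_equiv track=rewrite | github.com/ericzhang98/competitive | codejam/2021/round1a/b.py | solution
-- ===== SOURCE A (Python) =====
-- import collections
--
-- def solution(hm):
--     # product of numbers < 499*10^15 < 2^60 -> at most 60 cards in product group
--     # sum of those numbers < 499*60 = 29940
--     # answer must be between [total_sum - 29940, total_sum]
--     # try each one, factorize by using only the possible primes
--
--     PRIMES = [2, 3, 5, 7, 11, 13, 17, 19, 23, 29, 31, 37, 41, 43, 47, 53, 59, 61, 67, 71, 73, 79, 83, 89, 97, 101, 103, 107, 109, 113, 127, 131, 137, 139, 149, 151, 157, 163, 167, 173, 179, 181, 191, 193, 197, 199, 211, 223, 227, 229, 233, 239, 241, 251, 257, 263, 269, 271, 277, 281, 283, 293, 307, 311, 313, 317, 331, 337, 347, 349, 353, 359, 367, 373, 379, 383, 389, 397, 401, 409, 419, 421, 431, 433, 439, 443, 449, 457, 461, 463, 467, 479, 487, 491, 499]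
--     def factorize(P):
--         factors = collections.Counter()
--         for prime in PRIMES:
--             while P % prime == 0:
--                 factors[prime] += 1
--                 P //= prime
--         if P != 1:
--             return None
--         return factors
--
--     ans = 0
--     total_sum = sum(k*v for k,v in hm.items())
--     #eprint(total_sum)
--     for P in range(max(2,total_sum - 29940), total_sum+1):
--         factors = factorize(P)
--         if factors is None:
--             continue
--         remaining = collections.Counter(hm)
--         for factor, count in factors.items():
--             if factor not in hm or hm[factor] < count:
--                 break
--             remaining[factor] -= count
--         else:
--             if sum(k*v for k,v in remaining.items()) == P:
--                 ans = max(ans, P)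
--         #eprint(P, hm, factors, remaining)
--     return ans
-- ===== SOURCE B (Python) =====
-- def solution(hm):
--     # Enumerate the achievable products directly by DFS over the card primes
--     # (pruning once the partial product exceeds the total), instead of scanning
--     # the 29941-wide candidate window and factorizing every candidate.
--     PRIMES = [2, 3, 5, 7, 11, 13, 17, 19, 23, 29, 31, 37, 41, 43, 47, 53, 59, 61, 67, 71, 73, 79, 83, 89, 97, 101, 103, 107, 109, 113, 127, 131, 137, 139, 149, 151, 157, 163, 167, 173, 179, 181, 191, 193, 197, 199, 211, 223, 227, 229, 233, 239, 241, 251, 257, 263, 269, 271, 277, 281, 283, 293, 307, 311, 313, 317, 331, 337, 347, 349, 353, 359, 367, 373, 379, 383, 389, 397, 401, 409, 419, 421, 431, 433, 439, 443, 449, 457, 461, 463, 467, 479, 487, 491, 499]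
--     total = sum(k * v for k, v in hm.items())
--     lo = max(2, total - 29940)
--     pairs = [(p, hm.get(p, 0)) for p in PRIMES]
--
--     def dfs(pairs, prod, used):
--         if prod > total:          # every extension is even larger: prune
--             return 0
--         if not pairs:
--             return prod if lo <= prod and total - used == prod else 0
--         (p, c), rest = pairs[0], pairs[1:]
--         best = dfs(rest, prod, used)                # take no further copy of p
--         if c >= 1:                                  # take one copy of p
--             best = max(best, dfs([(p, c - 1)] + rest, prod * p, used + p))
--         return best
--
--     return dfs(pairs, 1, 0)
-- ===== Notes on version B (the rewrite author's own statement) =====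
-- stated objective: alternative
-- what changed: A scans every candidate in the ~29941-wide window [total-29940, total], factorizes each by trial division over the 95-prime table, replays a Counter-based subset validation and re-sums the remaining multiset; B never scans the window: it enumerates the achievable products directly by DFS over the card primes (take-one-copy / skip-prime branching, pruned once the partial product exceeds the total) and checks the window and remaining-sum condition only at the leaves.
import Mathlib
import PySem

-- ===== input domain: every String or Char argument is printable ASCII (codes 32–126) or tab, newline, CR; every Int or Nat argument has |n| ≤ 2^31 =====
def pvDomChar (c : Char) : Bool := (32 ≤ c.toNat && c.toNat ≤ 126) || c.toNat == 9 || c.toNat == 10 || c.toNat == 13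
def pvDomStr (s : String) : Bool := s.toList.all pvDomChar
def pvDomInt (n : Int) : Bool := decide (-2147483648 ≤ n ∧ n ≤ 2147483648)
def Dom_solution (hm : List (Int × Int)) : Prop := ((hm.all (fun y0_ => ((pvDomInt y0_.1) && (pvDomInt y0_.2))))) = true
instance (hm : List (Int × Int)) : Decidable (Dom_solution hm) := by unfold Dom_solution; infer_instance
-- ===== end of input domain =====

-- B replaces A's window scan (try every candidate in [total-29940, total], factorize it,
-- validate against the card counts, re-sum the remainder) by a DFS that enumerates the
-- achievable products over the card primes directly, pruning once the partial product
-- exceeds the total; same return value on every duplicate-key-free input.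

-- ===== PORT A =====
-- the PRIMES table both Python versions carry
def pvPRIMES : List Int := [2, 3, 5, 7, 11, 13, 17, 19, 23, 29, 31, 37, 41, 43, 47, 53, 59, 61, 67, 71, 73, 79, 83, 89, 97, 101, 103, 107, 109, 113, 127, 131, 137, 139, 149, 151, 157, 163, 167, 173, 179, 181, 191, 193, 197, 199, 211, 223, 227, 229, 233, 239, 241, 251, 257, 263, 269, 271, 277, 281, 283, 293, 307, 311, 313, 317, 331, 337, 347, 349, 353, 359, 367, 373, 379, 383, 389, 397, 401, 409, 419, 421, 431, 433, 439, 443, 449, 457, 461, 463, 467, 479, 487, 491, 499]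

-- `while P % prime == 0: factors[prime] += 1; P //= prime`  (the extra `2 ≤ prime ∧ 0 < P`
-- in the guard is only for totality: every call has prime ∈ PRIMES ≥ 2 and P > 0,
-- so the guard never changes behaviour there)
def pvFacWhile (prime P cnt : Int) : Int × Int :=
  if h : 2 ≤ prime ∧ 0 < P ∧ PySem.Int.mod P prime = 0 then
    pvFacWhile prime (PySem.Int.floordiv P prime) (cnt + 1)
  else (P, cnt)
  termination_by P.natAbs
  decreasing_by
    obtain ⟨h1, h2, h3⟩ := h
    have hd : prime ∣ P := (PySem.Int.mod_eq_zero_iff_dvd P prime).1 h3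
    rw [PySem.Int.floordiv_eq_ediv_of_pos (by omega : (0:Int) < prime)]
    have hmul : P / prime * prime = P := Int.ediv_mul_cancel hd
    have hpos : 0 < P / prime := by nlinarith
    have hlt : P / prime < P := by nlinarith
    omega

-- one iteration of `for prime in PRIMES:` inside factorize; the Counter holds exactly
-- the primes whose count was incremented, in PRIMES order, so it is the appended list
def pvAStep (st : Int × List (Int × Int)) (prime : Int) : Int × List (Int × Int) :=
  (((pvFacWhile prime st.1 0).1),
   if 0 < (pvFacWhile prime st.1 0).2 then st.2 ++ [(prime, (pvFacWhile prime st.1 0).2)] else st.2)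

def pvFactorize (P : Int) : Option (List (Int × Int)) :=
  if (pvPRIMES.foldl pvAStep (P, [])).1 ≠ 1 then none
  else some (pvPRIMES.foldl pvAStep (P, [])).2

-- `for factor, count in factors.items(): if factor not in hm or hm[factor] < count: break
--  remaining[factor] -= count` — none encodes the break, some the for-else fall-through
def pvValidate (d : PySem.Dict Int Int) : List (Int × Int) → PySem.Dict Int Int → Option (PySem.Dict Int Int)
  | [], rem => some rem
  | (factor, count) :: rest, rem =>
    if !(d.contains factor) || decide (d.getD factor 0 < count) then none
    else pvValidate d rest (rem.insert factor (rem.getD factor 0 - count))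

-- sum(k*v for k,v in d.items())
def pvSumItems (d : PySem.Dict Int Int) : Int := (d.items.map (fun kv => kv.1 * kv.2)).sum

def solution (hm : List (Int × Int)) : Int :=
  (PySem.List.pyRange (max 2 (pvSumItems (PySem.Dict.mk hm) - 29940)) (pvSumItems (PySem.Dict.mk hm) + 1) 1).foldl
    (fun ans P =>
      match pvFactorize P with
      | none => ans
      | some factors =>
        match pvValidate (PySem.Dict.mk hm) factors (PySem.Dict.mk hm) with
        | none => ans
        | some remaining => if pvSumItems remaining = P then max ans P else ans)
    0

-- ===== PORT B =====
-- `def dfs(pairs, prod, used): …` — each node either takes no further copy of the head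
-- prime (move to rest) or takes one copy (head count decremented); prune on prod > total
def pvDfs (total lo : Int) : List (Int × Int) → Int → Int → Int
  | [], prod, used =>
      if total < prod then 0
      else if lo ≤ prod ∧ total - used = prod then prod else 0
  | (p, c) :: rest, prod, used =>
      if total < prod then 0
      else
        let best := pvDfs total lo rest prod used
        if 1 ≤ c then max best (pvDfs total lo ((p, c - 1) :: rest) (prod * p) (used + p))
        else best
  termination_by pairs _ _ => (pairs.length, ((pairs.headD (0, 0)).2).toNat)
  decreasing_by
    · exact Prod.Lex.left _ _ (by simp)
    · exact Prod.Lex.right _ (by simp; omega)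

def solution_alt (hm : List (Int × Int)) : Int :=
  pvDfs ((hm.map (fun kv => kv.1 * kv.2)).sum)
        (max 2 ((hm.map (fun kv => kv.1 * kv.2)).sum - 29940))
        (pvPRIMES.map (fun p => (p, (PySem.Dict.mk hm).getD p 0)))
        1 0

-- ===== PRECONDITION & SPEC =====
-- Pre_ excludes association lists with a repeated key: the parameter is a Python dict,
-- which cannot hold a duplicate key, so such lists correspond to no Python input (the
-- PySem.Dict model of in-place overwrite is only Python's dict on duplicate-free lists).
def Pre_solution (hm : List (Int × Int)) : Prop := (hm.map Prod.fst).Nodup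
instance (hm : List (Int × Int)) : Decidable (Pre_solution hm) := by unfold Pre_solution; infer_instance

def pvWitness_solution : (List (Int × Int)) := [(2, 3), (3, 1)]

def Spec_solution (hm : List (Int × Int)) (out : Int) : Prop := out = solution_alt hm
instance (hm : List (Int × Int)) (out : Int) : Decidable (Spec_solution hm out) := by unfold Spec_solution; infer_instance

-- ===== CLAIM (what is proved, stated in full; the proofs are below) =====
def Claim_equal_solution : Prop := ∀ (hm : List (Int × Int)), Dom_solution hm → Pre_solution hm → Spec_solution hm (solution hm)

-- ===== LEMMAS AND PROOFS =====

-- proof-side helpers: A's per-candidate work, fused into one bounded trial-division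
-- pass per candidate (the intermediate form both ports are compared through)
def pvDivLoop (p r used avail : Int) : Int × Int :=
  if h : 0 < avail ∧ PySem.Int.mod r p = 0 then
    pvDivLoop p (PySem.Int.floordiv r p) (used + p) (avail - 1)
  else (r, used)
  termination_by avail.toNat
  decreasing_by omega

def pvBStep (d : PySem.Dict Int Int) (s : Int × Int) (p : Int) : Int × Int :=
  pvDivLoop p s.1 s.2 (d.getD p 0)

-- exponent assignments over the (prime, count) pairs list: the product, the used sum,
-- and the per-prime cap
def pvProdOf : List (Int × Int) → List Nat → Int
  | (p, _) :: ps, e :: es => p ^ e * pvProdOf ps es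
  | _, _ => 1

def pvUsedOf : List (Int × Int) → List Nat → Int
  | (p, _) :: ps, e :: es => p * e + pvUsedOf ps es
  | _, _ => 0

def pvCaps : List (Int × Int) → List Nat → Prop :=
  List.Forall₂ (fun pc e => e ≤ pc.2.toNat)

-- every entry of the PRIMES table is ≥ 2 and prime
set_option maxRecDepth 40000 in
lemma pvPRIMES_facts : ∀ p ∈ pvPRIMES, 2 ≤ p ∧ Nat.Prime p.natAbs := by decide

set_option maxRecDepth 40000 in
lemma pvPRIMES_nodup : pvPRIMES.Nodup := by decide

-- characterization of A's inner while loop: it strips the full power of `prime`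
lemma pvFacWhile_spec (prime : Int) (hp : 2 ≤ prime) :
    ∀ n (P : Int), P.natAbs ≤ n → 0 < P → ∀ cnt,
    ∃ (e : Nat) (r1 : Int), pvFacWhile prime P cnt = (r1, cnt + e) ∧ 0 < r1 ∧
      ¬ prime ∣ r1 ∧ r1 * prime ^ e = P := by
  intro n
  induction n with
  | zero => intro P hle hP cnt; exfalso; omega
  | succ n ih =>
    intro P hle hP cnt
    rw [pvFacWhile]
    by_cases hd : prime ∣ P
    · have hmod : PySem.Int.mod P prime = 0 := (PySem.Int.mod_eq_zero_iff_dvd P prime).2 hd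
      rw [dif_pos ⟨hp, hP, hmod⟩]
      have hfl : PySem.Int.floordiv P prime = P / prime :=
        PySem.Int.floordiv_eq_ediv_of_pos (by omega)
      have hQP : P / prime * prime = P := Int.ediv_mul_cancel hd
      have hQpos : 0 < P / prime := by nlinarith [hQP]
      have hlt : P / prime < P := by nlinarith
      obtain ⟨e, r1, heq, hr1, hnd, hmul⟩ := ih (P / prime) (by omega) hQpos (cnt + 1)
      refine ⟨e + 1, r1, ?_, hr1, hnd, ?_⟩
      · rw [hfl, heq]
        have hc : cnt + 1 + (e : Int) = cnt + ((e : Nat) + 1 : Nat) := by push_cast; ring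
        rw [hc]
      · rw [pow_succ, ← mul_assoc, hmul, hQP]
    · rw [dif_neg (by
        intro hc
        exact hd ((PySem.Int.mod_eq_zero_iff_dvd P prime).1 hc.2.2))]
      exact ⟨0, P, by simp, hP, hd, by simp⟩

-- B-side analysis of the fused loop: full strip when enough copies are available
lemma pvDivLoop_full (p : Int) (hp : 2 ≤ p) (e : Nat) :
    ∀ (r1 used avail : Int), 0 < r1 → ¬ p ∣ r1 → (e : Int) ≤ avail →
    pvDivLoop p (r1 * p ^ e) used avail = (r1, used + p * e) := by
  induction e with
  | zero =>
    intro r1 used avail h1 h2 h3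
    simp only [pow_zero, mul_one, Nat.cast_zero, mul_zero, add_zero]
    rw [pvDivLoop, dif_neg (by
      intro hc
      exact h2 ((PySem.Int.mod_eq_zero_iff_dvd r1 p).1 hc.2))]
  | succ e ih =>
    intro r1 used avail h1 h2 h3
    have he1 : (0:Int) < avail := by push_cast at h3; omega
    have hdvd : p ∣ r1 * p ^ (e + 1) := ⟨r1 * p ^ e, by ring⟩
    rw [pvDivLoop, dif_pos ⟨he1, (PySem.Int.mod_eq_zero_iff_dvd _ p).2 hdvd⟩]
    have hfl : PySem.Int.floordiv (r1 * p ^ (e + 1)) p = r1 * p ^ e := by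
      rw [PySem.Int.floordiv_eq_ediv_of_pos (by omega : (0:Int) < p), pow_succ, ← mul_assoc]
      exact Int.mul_ediv_cancel _ (by omega)
    rw [hfl, ih r1 (used + p) (avail - 1) h1 h2 (by push_cast at h3 ⊢; omega)]
    simp only [Prod.mk.injEq, true_and]
    push_cast
    ring

lemma pvDivLoop_notdvd (p r used avail : Int) (h : ¬ p ∣ r) :
    pvDivLoop p r used avail = (r, used) := by
  rw [pvDivLoop]
  rw [dif_neg]
  intro hc
  exact h ((PySem.Int.mod_eq_zero_iff_dvd r p).1 hc.2)

-- general shape of the fused loop's result: some stripped power within the cap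
lemma pvDivLoop_spec (p : Int) (hp : 2 ≤ p) :
    ∀ n (r : Int), r.natAbs ≤ n → 0 < r → ∀ (used avail : Int),
    ∃ (e : Nat) (r1 : Int), pvDivLoop p r used avail = (r1, used + p * e) ∧ 0 < r1 ∧
      r1 * p ^ e = r ∧ e ≤ avail.toNat := by
  intro n
  induction n with
  | zero => intro r hle hr; exfalso; omega
  | succ n ih =>
    intro r hle hr used avail
    rw [pvDivLoop]
    by_cases h : 0 < avail ∧ PySem.Int.mod r p = 0
    · rw [dif_pos h]
      have hd : p ∣ r := (PySem.Int.mod_eq_zero_iff_dvd r p).1 h.2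
      have hfl : PySem.Int.floordiv r p = r / p :=
        PySem.Int.floordiv_eq_ediv_of_pos (by omega)
      have hQP : r / p * p = r := Int.ediv_mul_cancel hd
      have hQpos : 0 < r / p := by nlinarith [hQP]
      have hlt : r / p < r := by nlinarith
      obtain ⟨e, r1, heq, hr1, hmul, hcap⟩ := ih (r / p) (by omega) hQpos (used + p) (avail - 1)
      refine ⟨e + 1, r1, ?_, hr1, ?_, by omega⟩
      · rw [hfl, heq]
        have : used + p + p * (e : Int) = used + p * ((e : Nat) + 1 : Nat) := by push_cast; ring
        rw [this]
      · rw [pow_succ, ← mul_assoc, hmul, hQP]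
    · rw [dif_neg h]
      exact ⟨0, r, by simp, hr, by simp, by omega⟩

-- dividing by p ≥ 2 with q prime, q ∤ p preserves positivity and divisibility by q
lemma pvDivLoop_preserve (q p : Int) (hq : Prime q) (hqp : ¬ q ∣ p) (hp : 2 ≤ p) :
    ∀ n (r : Int), r.natAbs ≤ n → ∀ used avail, 0 < r → q ∣ r →
    0 < (pvDivLoop p r used avail).1 ∧ q ∣ (pvDivLoop p r used avail).1 := by
  intro n
  induction n with
  | zero => intro r hle used avail hr hqr; exfalso; omega
  | succ n ih =>
    intro r hle used avail hr hqr
    rw [pvDivLoop]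
    split_ifs with h
    · obtain ⟨ha, hm⟩ := h
      have hdvd : p ∣ r := (PySem.Int.mod_eq_zero_iff_dvd r p).1 hm
      have hfl : PySem.Int.floordiv r p = r / p :=
        PySem.Int.floordiv_eq_ediv_of_pos (by omega)
      have hmul : r / p * p = r := Int.ediv_mul_cancel hdvd
      have hpos : 0 < r / p := by nlinarith [hmul]
      have hlt : r / p < r := by nlinarith
      have hq2 : q ∣ r / p := by
        have hqm : q ∣ (r / p) * p := by rw [hmul]; exact hqr
        rcases (hq.dvd_mul).1 hqm with h' | h'
        · exact h'
        · exact absurd h' hqp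
      rw [hfl]
      exact ih (r / p) (by omega) (used + p) (avail - 1) hpos hq2
    · exact ⟨hr, hqr⟩

-- ... extended to the whole fold over the remaining primes
lemma pvBFold_preserve (d : PySem.Dict Int Int) (q : Int) (hq : Prime q) :
    ∀ (ps : List Int), (∀ p ∈ ps, 2 ≤ p ∧ ¬ q ∣ p) → ∀ (r used : Int), 0 < r → q ∣ r →
    0 < (ps.foldl (pvBStep d) (r, used)).1 ∧ q ∣ (ps.foldl (pvBStep d) (r, used)).1 := by
  intro ps
  induction ps with
  | nil => intro _ r used hr hqr; exact ⟨hr, hqr⟩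
  | cons p tl ih =>
    intro hps r used hr hqr
    obtain ⟨hp2, hqp⟩ := hps p (by simp)
    have hhead := pvDivLoop_preserve q p hq hqp hp2 r.natAbs r le_rfl used (d.getD p 0) hr hqr
    simp only [List.foldl_cons]
    exact ih (fun p hp => hps p (by simp [hp])) _ _ hhead.1 hhead.2

-- A's factorize fold: the factor list is appended on the right of the accumulator
lemma pvAFold_acc : ∀ (ps : List Int) (r : Int) (acc : List (Int × Int)),
    ps.foldl pvAStep (r, acc) =
      ((ps.foldl pvAStep (r, [])).1, acc ++ (ps.foldl pvAStep (r, [])).2) := by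
  intro ps
  induction ps with
  | nil => intro r acc; simp
  | cons p tl ih =>
    intro r acc
    have hstep : ∀ (a : List (Int × Int)), pvAStep (r, a) p
        = ((pvAStep (r, []) p).1, a ++ (pvAStep (r, []) p).2) := by
      intro a
      unfold pvAStep
      dsimp only
      split_ifs <;> simp
    simp only [List.foldl_cons]
    rw [hstep acc]
    rw [ih ((pvAStep (r, []) p).1) (acc ++ (pvAStep (r, []) p).2)]
    conv_rhs => rw [show pvAStep (r, []) p = ((pvAStep (r, []) p).1, (pvAStep (r, []) p).2) from rfl,
                    ih ((pvAStep (r, []) p).1) ((pvAStep (r, []) p).2)]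
    simp

-- over a list of distinct primes, the fused loop succeeds (residual 1) exactly when
-- A's factorization succeeds and validates, and then `used` is the used sum
lemma pvMain (d : PySem.Dict Int Int) : ∀ (ps : List Int),
    (∀ p ∈ ps, 2 ≤ p ∧ Nat.Prime p.natAbs) → ps.Pairwise (· ≠ ·) →
    ∀ (r used : Int), 0 < r →
    0 < (ps.foldl (pvBStep d) (r, used)).1 ∧
    ((ps.foldl (pvBStep d) (r, used)).1 = 1 ↔
      ((ps.foldl pvAStep (r, [])).1 = 1 ∧
        ∀ pc ∈ (ps.foldl pvAStep (r, [])).2, d.contains pc.1 = true ∧ pc.2 ≤ d.getD pc.1 0)) ∧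
    ((ps.foldl (pvBStep d) (r, used)).1 = 1 →
      (ps.foldl (pvBStep d) (r, used)).2 =
        used + (((ps.foldl pvAStep (r, [])).2).map (fun pc => pc.1 * pc.2)).sum) := by
  intro ps
  induction ps with
  | nil =>
    intro _ _ r used hr
    refine ⟨hr, by simp, by simp⟩
  | cons p tl ih =>
    intro hps hpw r used hr
    obtain ⟨hp2, hpprime⟩ := hps p (by simp)
    have htl : ∀ q ∈ tl, 2 ≤ q ∧ Nat.Prime q.natAbs := fun q hq => hps q (by simp [hq])
    have hne : ∀ q ∈ tl, p ≠ q := (List.pairwise_cons.1 hpw).1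
    have hpwtl := (List.pairwise_cons.1 hpw).2
    obtain ⟨e, r1, heq, hr1, hndvd, hmul⟩ := pvFacWhile_spec p hp2 r.natAbs r le_rfl hr 0
    have hstepA : pvAStep (r, []) p = (r1, if 0 < (e:Int) then [(p, (e:Int))] else []) := by
      unfold pvAStep
      rw [heq]
      simp
    have hA1 : (p :: tl).foldl pvAStep (r, []) =
        ((tl.foldl pvAStep (r1, [])).1,
          (if 0 < (e:Int) then [(p, (e:Int))] else []) ++ (tl.foldl pvAStep (r1, [])).2) := by
      rw [List.foldl_cons, hstepA, pvAFold_acc tl r1 (if 0 < (e:Int) then [(p, (e:Int))] else [])]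
    by_cases he0 : e = 0
    · subst he0
      have hr1r : r1 = r := by simpa using hmul
      have hB : pvBStep d (r, used) p = (r, used) := by
        unfold pvBStep
        exact pvDivLoop_notdvd p r used _ (hr1r ▸ hndvd)
      have hAx : (p :: tl).foldl pvAStep (r, []) = tl.foldl pvAStep (r, []) := by
        rw [hA1, hr1r]
        simp
      rw [hAx]
      simp only [List.foldl_cons, hB]
      exact ih htl hpwtl r used hr
    · have hepos : (0:Int) < (e:Int) := by exact_mod_cast Nat.pos_of_ne_zero he0
      have hfs0 : (if 0 < (e:Int) then [(p, (e:Int))] else []) = [(p, (e:Int))] := if_pos hepos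
      rw [hA1, hfs0]
      by_cases hav : (e : Int) ≤ d.getD p 0
      · have hB : pvBStep d (r, used) p = (r1, used + p * e) := by
          unfold pvBStep
          rw [← hmul]
          exact pvDivLoop_full p hp2 e r1 used (d.getD p 0) hr1 hndvd hav
        obtain ⟨ihpos, ihiff, ihsum⟩ := ih htl hpwtl r1 (used + p * e) hr1
        have hcon : d.contains p = true := by
          by_contra hc
          have h0 : d.getD p 0 = 0 :=
            PySem.Dict.getD_of_not_contains d 0 (by simpa using hc)
          omega
        simp only [List.foldl_cons, hB]
        refine ⟨ihpos, ?_, ?_⟩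
        · rw [ihiff]
          constructor
          · rintro ⟨h1, h2⟩
            refine ⟨h1, ?_⟩
            intro pc hpc
            rcases List.mem_cons.1 hpc with hpc | hpc
            · subst hpc
              exact ⟨hcon, hav⟩
            · exact h2 pc hpc
          · rintro ⟨h1, h2⟩
            exact ⟨h1, fun pc hpc => h2 pc (List.mem_cons_of_mem _ hpc)⟩
        · intro hB1
          rw [ihsum hB1]
          simp only [List.cons_append, List.nil_append, List.map_cons, List.sum_cons]
          ring
      · have hmax : max (d.getD p 0) 0 < (e:Int) := by omega
        have hBpart : 0 < (pvDivLoop p (r1 * p ^ e) used (d.getD p 0)).1 ∧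
            p ∣ (pvDivLoop p (r1 * p ^ e) used (d.getD p 0)).1 := by
          obtain ⟨e', r1', heq', hr1', hmul', hcap'⟩ :=
            pvDivLoop_spec p hp2 (r1 * p ^ e).natAbs (r1 * p ^ e) le_rfl (by positivity) used (d.getD p 0)
          rw [heq']
          refine ⟨hr1', ?_⟩
          have he'lt : e' < e := by omega
          have : r1' = r1 * p ^ (e - e') := by
            have hpe : (p : Int) ^ e = p ^ e' * p ^ (e - e') := by
              rw [← pow_add]
              congr 1
              omega
            have hppos : (0:Int) < p ^ e' := by positivity
            nlinarith [hmul', hpe]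
          rw [this]
          exact Dvd.dvd.mul_left ⟨p ^ (e - e' - 1), by
            rw [← pow_succ']
            congr 1
            omega⟩ r1
        have hhead : pvBStep d (r, used) p = pvDivLoop p (r1 * p ^ e) used (d.getD p 0) := by
          unfold pvBStep
          rw [← hmul]
        have hprime : Prime p := Int.prime_iff_natAbs_prime.2 hpprime
        have htlprops : ∀ q ∈ tl, 2 ≤ q ∧ ¬ p ∣ q := by
          intro q hq
          obtain ⟨hq2, hqprime⟩ := htl q hq
          refine ⟨hq2, ?_⟩
          intro hdvd
          have h1 : p.natAbs ∣ q.natAbs := Int.natAbs_dvd_natAbs.2 hdvd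
          have h2 : p.natAbs = q.natAbs := (Nat.prime_dvd_prime_iff_eq hpprime hqprime).1 h1
          exact hne q hq (by omega)
        have hfold := pvBFold_preserve d p hprime tl htlprops
          (pvDivLoop p (r1 * p ^ e) used (d.getD p 0)).1
          (pvDivLoop p (r1 * p ^ e) used (d.getD p 0)).2 hBpart.1 hBpart.2
        simp only [List.foldl_cons, hhead]
        have hBne : (List.foldl (pvBStep d) (pvDivLoop p (r1 * p ^ e) used (d.getD p 0)) tl).1 ≠ 1 := by
          intro h1
          have hdv := hfold.2
          rw [h1] at hdv
          have := Int.le_of_dvd one_pos hdv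
          omega
        refine ⟨hfold.1, ?_, ?_⟩
        · constructor
          · intro h1
            exact absurd h1 hBne
          · rintro ⟨h1, h2⟩
            have hmem := h2 (p, (e:Int)) (by simp)
            exact absurd hav (by simpa using not_lt.2 hmem.2)
        · intro h1
          exact absurd h1 hBne

-- list level: replacing the unique entry at key k changes the value-sum accordingly
lemma pvSumL (k v : Int) : ∀ (l : List (Int × Int)), (l.map Prod.fst).Nodup →
    l.any (fun p => p.1 == k) = true →
    ((l.map (fun p => if p.1 == k then (k, v) else p)).map (fun kv => kv.1 * kv.2)).sum
      = (l.map (fun kv => kv.1 * kv.2)).sum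
        - k * ((l.find? (fun p => p.1 == k)).map (fun x => x.2)).getD 0 + k * v := by
  intro l
  induction l with
  | nil => intro _ h; simp at h
  | cons hd tl ih =>
    intro hnd hany
    by_cases hk : hd.1 = k
    · have htl : ∀ p ∈ tl, (p.1 == k) = false := by
        intro p hp
        have hh : hd.1 ∉ tl.map Prod.fst := (List.nodup_cons.1 (by simpa using hnd)).1
        cases hb : (p.1 == k)
        · rfl
        · exfalso
          have hpk : p.1 = k := by simpa using hb
          exact hh (by
            rw [hk, ← hpk]
            exact List.mem_map_of_mem hp)
      have hmap : tl.map (fun p => if p.1 == k then (k, v) else p) = tl := by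
        conv_rhs => rw [← List.map_id tl]
        apply List.map_congr_left
        intro a ha
        simp [htl a ha]
      simp only [List.map_cons, List.sum_cons, List.find?_cons, hk, beq_self_eq_true, if_pos,
        Option.map_some, Option.getD_some]
      rw [hmap]
      ring
    · have hbeq : (hd.1 == k) = false := by simpa using hk
      have hany' : tl.any (fun p => p.1 == k) = true := by
        simpa [hbeq] using hany
      have hnd' : (tl.map Prod.fst).Nodup := (List.nodup_cons.1 (by simpa using hnd)).2
      simp only [List.map_cons, List.sum_cons, List.find?_cons, hbeq]
      rw [if_neg (by simp)]
      rw [ih hnd' hany']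
      ring

-- value-sum of a dict after one insert (keys unique)
lemma pvSumItems_insert (d : PySem.Dict Int Int) (k v : Int) (hnd : d.keys.Nodup) :
    pvSumItems (d.insert k v) = pvSumItems d - k * d.getD k 0 + k * v := by
  cases hc : d.contains k
  · rw [PySem.Dict.getD_of_not_contains d 0 hc]
    unfold pvSumItems
    rw [PySem.Dict.items_insert, if_neg (by simp [hc])]
    simp
  · unfold pvSumItems
    rw [PySem.Dict.items_insert, if_pos hc]
    have hgetD : d.getD k 0 = ((d.items.find? (fun p => p.1 == k)).map (fun x => x.2)).getD 0 := rfl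
    rw [hgetD]
    exact pvSumL k v d.items (by simpa [PySem.Dict.keys] using hnd) hc

-- A's validation loop succeeds iff every factor is available, and then the remaining
-- sum is the old sum minus the used sum
lemma pvValidate_some (d : PySem.Dict Int Int) : ∀ (fs : List (Int × Int)) (rem : PySem.Dict Int Int),
    rem.keys.Nodup →
    (∀ pc ∈ fs, d.contains pc.1 = true ∧ pc.2 ≤ d.getD pc.1 0) →
    ∃ rem', pvValidate d fs rem = some rem' ∧
      pvSumItems rem' = pvSumItems rem - ((fs.map fun pc => pc.1 * pc.2)).sum := by
  intro fs
  induction fs with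
  | nil =>
    intro rem hnd _
    exact ⟨rem, rfl, by simp⟩
  | cons fc rest ih =>
    intro rem hnd hall
    obtain ⟨f, c⟩ := fc
    obtain ⟨hcon, hle⟩ := hall (f, c) (by simp)
    have hcon' : d.contains f = true := hcon
    have hle' : c ≤ d.getD f 0 := hle
    have hcheck : (!(d.contains f) || decide (d.getD f 0 < c)) = false := by
      simp only [hcon', Bool.not_true, Bool.false_or, decide_eq_false_iff_not]
      omega
    obtain ⟨rem', hval, hsum⟩ := ih (rem.insert f (rem.getD f 0 - c))
      (PySem.Dict.nodup_keys_insert rem f _ hnd)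
      (fun pc hpc => hall pc (by simp [hpc]))
    refine ⟨rem', ?_, ?_⟩
    · simp only [pvValidate, hcheck, Bool.false_eq_true, if_false]
      exact hval
    · rw [hsum, pvSumItems_insert rem f (rem.getD f 0 - c) hnd]
      simp only [List.map_cons, List.sum_cons]
      ring

lemma pvValidate_none (d : PySem.Dict Int Int) : ∀ (fs : List (Int × Int)) (rem : PySem.Dict Int Int),
    ¬ (∀ pc ∈ fs, d.contains pc.1 = true ∧ pc.2 ≤ d.getD pc.1 0) →
    pvValidate d fs rem = none := by
  intro fs
  induction fs with
  | nil =>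
    intro rem h
    exact absurd (by simp) h
  | cons fc rest ih =>
    intro rem h
    obtain ⟨f, c⟩ := fc
    by_cases hhead : d.contains f = true ∧ (c : Int) ≤ d.getD f 0
    · have hrest : ¬ ∀ pc ∈ rest, d.contains pc.1 = true ∧ pc.2 ≤ d.getD pc.1 0 := by
        intro hall
        apply h
        intro pc hpc
        rcases List.mem_cons.1 hpc with hpc | hpc
        · subst hpc
          exact ⟨hhead.1, hhead.2⟩
        · exact hall pc hpc
      have hcheck : (!(d.contains f) || decide (d.getD f 0 < c)) = false := by
        have h1 := hhead.1
        have h2 := hhead.2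
        simp only [h1, Bool.not_true, Bool.false_or, decide_eq_false_iff_not]
        omega
      simp only [pvValidate, hcheck, Bool.false_eq_true, if_false]
      exact ih _ hrest
    · have hcheck : (!(d.contains f) || decide (d.getD f 0 < c)) = true := by
        rcases not_and_or.1 hhead with hc | hc
        · have hcf : d.contains f = false := by
            simpa using hc
          simp [hcf]
        · have hlt : d.getD f 0 < c := by omega
          simp [hlt]
      simp [pvValidate, hcheck]

-- A's per-candidate body, rewritten through the fused per-candidate check
lemma pvStep_eq (hm : List (Int × Int)) (hnd : (hm.map Prod.fst).Nodup) (ans P : Int) (hP : 0 < P) :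
    (match pvFactorize P with
      | none => ans
      | some factors =>
        match pvValidate (PySem.Dict.mk hm) factors (PySem.Dict.mk hm) with
        | none => ans
        | some remaining => if pvSumItems remaining = P then max ans P else ans) =
    (if (pvPRIMES.foldl (pvBStep (PySem.Dict.mk hm)) (P, 0)).1 = 1 ∧
        (hm.map (fun kv => kv.1 * kv.2)).sum - (pvPRIMES.foldl (pvBStep (PySem.Dict.mk hm)) (P, 0)).2 = P
     then max ans P else ans) := by
  have hnd' : (PySem.Dict.mk hm).keys.Nodup := by simpa [PySem.Dict.keys] using hnd
  obtain ⟨hpos, hiff, hsum⟩ :=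
    pvMain (PySem.Dict.mk hm) pvPRIMES pvPRIMES_facts pvPRIMES_nodup P 0 hP
  have htot : (hm.map (fun kv => kv.1 * kv.2)).sum = pvSumItems (PySem.Dict.mk hm) := rfl
  rw [htot]
  unfold pvFactorize
  by_cases hA1 : (pvPRIMES.foldl pvAStep (P, [])).1 = 1
  · rw [if_neg (by simpa using hA1)]
    dsimp only
    by_cases hok : ∀ pc ∈ (pvPRIMES.foldl pvAStep (P, [])).2,
        (PySem.Dict.mk hm).contains pc.1 = true ∧ pc.2 ≤ (PySem.Dict.mk hm).getD pc.1 0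
    · obtain ⟨rem', hval, hsumr⟩ :=
        pvValidate_some (PySem.Dict.mk hm) (pvPRIMES.foldl pvAStep (P, [])).2 (PySem.Dict.mk hm) hnd' hok
      have hB1 : (pvPRIMES.foldl (pvBStep (PySem.Dict.mk hm)) (P, 0)).1 = 1 := hiff.2 ⟨hA1, hok⟩
      have hBs := hsum hB1
      rw [hval]
      dsimp only
      rw [hsumr, hB1, hBs]
      by_cases hfin : pvSumItems (PySem.Dict.mk hm)
          - (((pvPRIMES.foldl pvAStep (P, [])).2).map (fun pc => pc.1 * pc.2)).sum = P
      · rw [if_pos hfin, if_pos ⟨rfl, by omega⟩]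
      · rw [if_neg hfin, if_neg (by
          rintro ⟨-, hx⟩
          exact hfin (by omega))]
    · rw [pvValidate_none (PySem.Dict.mk hm) (pvPRIMES.foldl pvAStep (P, [])).2 (PySem.Dict.mk hm) hok]
      dsimp only
      rw [if_neg (by
        rintro ⟨hx, -⟩
        exact hok (hiff.1 hx).2)]
  · rw [if_pos (by simpa using hA1)]
    dsimp only
    rw [if_neg (by
      rintro ⟨hx, -⟩
      exact hA1 (hiff.1 hx).1)]

-- the product of an exponent assignment is at least 1 when all bases are ≥ 1
lemma pvProdOf_ge_one : ∀ (pairs : List (Int × Int)) (es : List Nat),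
    (∀ pc ∈ pairs, 1 ≤ pc.1) → 1 ≤ pvProdOf pairs es := by
  intro pairs
  induction pairs with
  | nil => intro es _; cases es <;> simp [pvProdOf]
  | cons pc rest ih =>
    intro es hall
    obtain ⟨p, c⟩ := pc
    cases es with
    | nil => simp [pvProdOf]
    | cons e es =>
      have hp : (1:Int) ≤ p := hall (p, c) (by simp)
      have h1 : (1:Int) ≤ p ^ e := one_le_pow₀ hp
      have h2 := ih es (fun pc hpc => hall pc (by simp [hpc]))
      calc (1:Int) = 1 * 1 := by ring
        _ ≤ p ^ e * pvProdOf rest es := by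
            exact mul_le_mul h1 h2 (by norm_num) (by omega)
        _ = pvProdOf ((p, c) :: rest) (e :: es) := rfl

-- a prime dividing no base does not divide the assignment product
lemma pvNotDvdProd (p : Int) (hp : Prime p) :
    ∀ (pairs : List (Int × Int)) (es : List Nat),
    (∀ pc ∈ pairs, Nat.Prime pc.1.natAbs ∧ pc.1.natAbs ≠ p.natAbs) →
    ¬ p ∣ pvProdOf pairs es := by
  intro pairs
  induction pairs with
  | nil => intro es _; cases es <;> simpa [pvProdOf] using hp.not_dvd_one
  | cons pc rest ih =>
    intro es hall
    obtain ⟨q, c⟩ := pc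
    cases es with
    | nil => simpa [pvProdOf] using hp.not_dvd_one
    | cons e es =>
      obtain ⟨hqprime, hqne⟩ := hall (q, c) (by simp)
      intro hdvd
      rcases hp.dvd_mul.1 hdvd with h | h
      · have hpq : p ∣ q := hp.dvd_of_dvd_pow h
        have h1 : p.natAbs ∣ q.natAbs := Int.natAbs_dvd_natAbs.2 hpq
        have hpp : Nat.Prime p.natAbs := Int.prime_iff_natAbs_prime.1 hp
        exact hqne ((Nat.prime_dvd_prime_iff_eq hpp hqprime).1 h1).symm
      · exact ih es (fun pc hpc => hall pc (by simp [hpc])) h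

-- FORWARD: every capped assignment's product is fully stripped by the fused fold
lemma pvFwd (d : PySem.Dict Int Int) :
    ∀ (ps : List Int), (∀ p ∈ ps, 2 ≤ p ∧ Nat.Prime p.natAbs) → ps.Pairwise (· ≠ ·) →
    ∀ es, pvCaps (ps.map fun p => (p, d.getD p 0)) es →
    ∀ used, ps.foldl (pvBStep d) (pvProdOf (ps.map fun p => (p, d.getD p 0)) es, used)
        = (1, used + pvUsedOf (ps.map fun p => (p, d.getD p 0)) es) := by
  intro ps
  induction ps with
  | nil =>
    intro _ _ es hcaps used
    cases es <;> simp [pvProdOf, pvUsedOf]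
  | cons p tl ih =>
    intro hps hpw es hcaps used
    obtain ⟨hp2, hpprime⟩ := hps p (by simp)
    have htl : ∀ q ∈ tl, 2 ≤ q ∧ Nat.Prime q.natAbs := fun q hq => hps q (by simp [hq])
    have hne : ∀ q ∈ tl, p ≠ q := (List.pairwise_cons.1 hpw).1
    have hpwtl := (List.pairwise_cons.1 hpw).2
    simp only [List.map_cons] at hcaps ⊢
    cases es with
    | nil => exact absurd hcaps (by intro h; cases h)
    | cons e es =>
      have hcap : e ≤ (d.getD p 0).toNat := by
        have := (List.forall₂_cons.1 hcaps).1
        simpa using this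
      have hcapstl : pvCaps (tl.map fun p => (p, d.getD p 0)) es := (List.forall₂_cons.1 hcaps).2
      have hQpos : 1 ≤ pvProdOf (tl.map fun p => (p, d.getD p 0)) es :=
        pvProdOf_ge_one _ _ (by
          intro pc hpc
          obtain ⟨q, hq, rfl⟩ := List.mem_map.1 hpc
          have := (htl q hq).1
          omega)
      have hndvd : ¬ p ∣ pvProdOf (tl.map fun p => (p, d.getD p 0)) es := by
        apply pvNotDvdProd p (Int.prime_iff_natAbs_prime.2 hpprime)
        intro pc hpc
        obtain ⟨q, hq, rfl⟩ := List.mem_map.1 hpc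
        obtain ⟨hq2, hqprime⟩ := htl q hq
        refine ⟨hqprime, ?_⟩
        intro habs
        exact hne q hq (by omega)
      have hprodOf : pvProdOf ((p, d.getD p 0) :: tl.map fun p => (p, d.getD p 0)) (e :: es)
          = p ^ e * pvProdOf (tl.map fun p => (p, d.getD p 0)) es := rfl
      have husedOf : pvUsedOf ((p, d.getD p 0) :: tl.map fun p => (p, d.getD p 0)) (e :: es)
          = p * e + pvUsedOf (tl.map fun p => (p, d.getD p 0)) es := rfl
      rw [hprodOf, husedOf, List.foldl_cons]
      have hstep : pvBStep d (p ^ e * pvProdOf (tl.map fun p => (p, d.getD p 0)) es, used) p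
          = (pvProdOf (tl.map fun p => (p, d.getD p 0)) es, used + p * e) := by
        unfold pvBStep
        by_cases he0 : e = 0
        · subst he0
          simp only [pow_zero, one_mul]
          rw [pvDivLoop_notdvd p _ used _ hndvd]
          simp
        · have hce : (e : Int) ≤ d.getD p 0 := by omega
          rw [mul_comm]
          exact pvDivLoop_full p hp2 e _ used (d.getD p 0) (by omega) hndvd hce
      rw [hstep, ih htl hpwtl es hcapstl (used + p * e)]
      congr 1
      ring

-- BACKWARD: if the fused fold strips the candidate to 1, the candidate is the product
-- of some capped assignment, and the second component is the used sum
lemma pvBwd (d : PySem.Dict Int Int) :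
    ∀ (ps : List Int), (∀ p ∈ ps, 2 ≤ p ∧ Nat.Prime p.natAbs) → ps.Pairwise (· ≠ ·) →
    ∀ (P used : Int), 0 < P → (ps.foldl (pvBStep d) (P, used)).1 = 1 →
    ∃ es, pvCaps (ps.map fun p => (p, d.getD p 0)) es ∧
      P = pvProdOf (ps.map fun p => (p, d.getD p 0)) es ∧
      (ps.foldl (pvBStep d) (P, used)).2 = used + pvUsedOf (ps.map fun p => (p, d.getD p 0)) es := by
  intro ps
  induction ps with
  | nil =>
    intro _ _ P used hP h1
    refine ⟨[], List.Forall₂.nil, ?_, ?_⟩ <;> simp_all [pvProdOf, pvUsedOf]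
  | cons p tl ih =>
    intro hps hpw P used hP h1
    obtain ⟨hp2, hpprime⟩ := hps p (by simp)
    have htl : ∀ q ∈ tl, 2 ≤ q ∧ Nat.Prime q.natAbs := fun q hq => hps q (by simp [hq])
    have hne : ∀ q ∈ tl, p ≠ q := (List.pairwise_cons.1 hpw).1
    have hpwtl := (List.pairwise_cons.1 hpw).2
    obtain ⟨e, r1, heq, hr1, hmul, hcap⟩ :=
      pvDivLoop_spec p hp2 P.natAbs P le_rfl hP used (d.getD p 0)
    have hstep : pvBStep d (P, used) p = (r1, used + p * e) := heq
    have hndvd : ¬ p ∣ r1 := by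
      intro hdvd
      have hprime : Prime p := Int.prime_iff_natAbs_prime.2 hpprime
      have htlprops : ∀ q ∈ tl, 2 ≤ q ∧ ¬ p ∣ q := by
        intro q hq
        obtain ⟨hq2, hqprime⟩ := htl q hq
        refine ⟨hq2, ?_⟩
        intro hd
        have hd1 : p.natAbs ∣ q.natAbs := Int.natAbs_dvd_natAbs.2 hd
        have := (Nat.prime_dvd_prime_iff_eq hpprime hqprime).1 hd1
        exact hne q hq (by omega)
      have hfold := pvBFold_preserve d p hprime tl htlprops r1 (used + p * e) hr1 hdvd
      rw [List.foldl_cons, hstep] at h1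
      rw [h1] at hfold
      have := Int.le_of_dvd one_pos hfold.2
      omega
    rw [List.foldl_cons, hstep] at h1 ⊢
    obtain ⟨es, hcaps, hPeq, hsum⟩ := ih htl hpwtl r1 (used + p * e) hr1 h1
    refine ⟨e :: es, ?_, ?_, ?_⟩
    · simp only [List.map_cons]
      exact List.forall₂_cons.2 ⟨by simpa using hcap, hcaps⟩
    · simp only [List.map_cons]
      show P = p ^ e * pvProdOf (tl.map fun p => (p, d.getD p 0)) es
      rw [← hPeq, ← hmul]
      ring
    · simp only [List.map_cons]
      show _ = used + (p * e + pvUsedOf (tl.map fun p => (p, d.getD p 0)) es)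
      rw [hsum]
      ring

-- the DFS port computes exactly the maximum (or 0) of the accepted assignment products
lemma pvDfs_spec (total lo : Int) :
    ∀ (pairs : List (Int × Int)) (prod used : Int),
      (∀ pc ∈ pairs, 2 ≤ pc.1) → 0 < prod →
      (0 ≤ pvDfs total lo pairs prod used) ∧
      (pvDfs total lo pairs prod used = 0 ∨
        ∃ es, pvCaps pairs es ∧
          lo ≤ prod * pvProdOf pairs es ∧ prod * pvProdOf pairs es ≤ total ∧
          total - (used + pvUsedOf pairs es) = prod * pvProdOf pairs es ∧
          pvDfs total lo pairs prod used = prod * pvProdOf pairs es) ∧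
      (∀ es, pvCaps pairs es →
        lo ≤ prod * pvProdOf pairs es → prod * pvProdOf pairs es ≤ total →
        total - (used + pvUsedOf pairs es) = prod * pvProdOf pairs es →
        prod * pvProdOf pairs es ≤ pvDfs total lo pairs prod used) := by
  intro pairs prod used
  induction pairs, prod, used using pvDfs.induct total lo with
  | case1 prod used hlt =>
    intro _ hprod
    have hval : pvDfs total lo [] prod used = 0 := by rw [pvDfs, if_pos hlt]
    rw [hval]
    refine ⟨le_rfl, Or.inl rfl, ?_⟩
    intro es _ _ hle _
    have h1 : pvProdOf [] es = 1 := by cases es <;> rfl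
    rw [h1, mul_one] at hle
    omega
  | case2 prod used hlt hcond =>
    intro _ hprod
    have hval : pvDfs total lo [] prod used = prod := by
      rw [pvDfs, if_neg hlt, if_pos hcond]
    rw [hval]
    refine ⟨by omega, Or.inr ⟨[], List.Forall₂.nil, ?_, ?_, ?_, ?_⟩, ?_⟩
    · simpa [pvProdOf] using hcond.1
    · simp only [pvProdOf, mul_one]; omega
    · simp only [pvProdOf, pvUsedOf, mul_one, add_zero]; omega
    · simp [pvProdOf]
    · intro es _ _ _ _
      have h1 : pvProdOf [] es = 1 := by cases es <;> rfl
      rw [h1, mul_one]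
  | case3 prod used hlt hcond =>
    intro _ hprod
    have hval : pvDfs total lo [] prod used = 0 := by
      rw [pvDfs, if_neg hlt, if_neg hcond]
    rw [hval]
    refine ⟨le_rfl, Or.inl rfl, ?_⟩
    intro es _ h1 _ h3
    have hp : pvProdOf [] es = 1 := by cases es <;> rfl
    have hu : pvUsedOf [] es = 0 := by cases es <;> rfl
    rw [hp, mul_one] at h1 h3
    rw [hu, add_zero] at h3
    exact absurd ⟨h1, h3⟩ hcond
  | case4 p c rest prod used hlt =>
    intro hall hprod
    have hval : pvDfs total lo ((p, c) :: rest) prod used = 0 := by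
      rw [pvDfs, if_pos hlt]
    rw [hval]
    refine ⟨le_rfl, Or.inl rfl, ?_⟩
    intro es _ _ hle _
    have hge : 1 ≤ pvProdOf ((p, c) :: rest) es :=
      pvProdOf_ge_one _ _ (fun pc hpc => by have := hall pc hpc; omega)
    nlinarith
  | case5 p c rest prod used hlt hc ih1 ih2 =>
    intro hall hprod
    have hallr : ∀ pc ∈ rest, 2 ≤ pc.1 := fun pc hpc => hall pc (by simp [hpc])
    have hp2 : (2:Int) ≤ p := hall (p, c) (by simp)
    have hall2 : ∀ pc ∈ (p, c - 1) :: rest, 2 ≤ pc.1 := by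
      intro pc hpc
      rcases List.mem_cons.1 hpc with h | h
      · subst h; exact hp2
      · exact hallr pc h
    obtain ⟨i1a, i1b, i1c⟩ := ih1 hallr hprod
    obtain ⟨i2a, i2b, i2c⟩ := ih2 hall2 (by positivity)
    have hval : pvDfs total lo ((p, c) :: rest) prod used =
        max (pvDfs total lo rest prod used)
            (pvDfs total lo ((p, c - 1) :: rest) (prod * p) (used + p)) := by
      rw [pvDfs]
      simp only [if_neg hlt, if_pos hc]
    rw [hval]
    refine ⟨le_max_of_le_left i1a, ?_, ?_⟩
    · -- (ii)
      rcases max_choice (pvDfs total lo rest prod used)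
        (pvDfs total lo ((p, c - 1) :: rest) (prod * p) (used + p)) with hm | hm
      · rw [hm]
        rcases i1b with h0 | ⟨es, hcaps, h1, h2, h3, h4⟩
        · exact Or.inl h0
        · refine Or.inr ⟨0 :: es, List.forall₂_cons.2 ⟨by simp, hcaps⟩, ?_, ?_, ?_, ?_⟩ <;>
          · show _root_.id _
            simp only [pvProdOf, pvUsedOf, pow_zero, one_mul, Nat.cast_zero, mul_zero, zero_add, _root_.id]
            assumption
      · rw [hm]
        rcases i2b with h0 | ⟨es, hcaps, h1, h2, h3, h4⟩
        · exact Or.inl h0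
        · obtain ⟨e, es₂, hcapE, hcaps₂, rfl⟩ : ∃ e es₂,
              e ≤ (c - 1).toNat ∧ pvCaps rest es₂ ∧ es = e :: es₂ := by
            cases hcaps with
            | cons hE hR => exact ⟨_, _, hE, hR, rfl⟩
          have hprodEq : prod * pvProdOf ((p, c) :: rest) ((e + 1) :: es₂)
              = prod * p * pvProdOf ((p, c - 1) :: rest) (e :: es₂) := by
            show prod * (p ^ (e + 1) * pvProdOf rest es₂) = prod * p * (p ^ e * pvProdOf rest es₂)
            rw [pow_succ]
            ring
          have husedEq : used + pvUsedOf ((p, c) :: rest) ((e + 1) :: es₂)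
              = used + p + pvUsedOf ((p, c - 1) :: rest) (e :: es₂) := by
            show used + (p * ((e:Int) + 1) + pvUsedOf rest es₂) = used + p + (p * e + pvUsedOf rest es₂)
            ring
          refine Or.inr ⟨(e + 1) :: es₂,
            List.forall₂_cons.2 ⟨by simp; omega, hcaps₂⟩, ?_, ?_, ?_, ?_⟩
          · rw [hprodEq]; exact h1
          · rw [hprodEq]; exact h2
          · rw [hprodEq]
            have : used + pvUsedOf ((p, c) :: rest) ((e+1) :: es₂)
                = used + p + pvUsedOf ((p, c-1) :: rest) (e :: es₂) := husedEq
            rw [show (used + pvUsedOf ((p, c) :: rest) ((e+1) :: es₂)) = (used + p + pvUsedOf ((p, c-1) :: rest) (e :: es₂)) from husedEq]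
            exact h3
          · rw [hprodEq]; exact h4
    · -- (iii)
      intro es hcaps h1 h2 h3
      obtain ⟨e, es₂, hcapE, hcaps₂, rfl⟩ : ∃ e es₂,
          e ≤ c.toNat ∧ pvCaps rest es₂ ∧ es = e :: es₂ := by
        cases hcaps with
        | cons hE hR => exact ⟨_, _, hE, hR, rfl⟩
      by_cases he : e = 0
      · subst he
        have hred : prod * pvProdOf ((p, c) :: rest) (0 :: es₂) = prod * pvProdOf rest es₂ := by
          show prod * (p ^ 0 * pvProdOf rest es₂) = _
          ring
        have hredu : used + pvUsedOf ((p, c) :: rest) (0 :: es₂) = used + pvUsedOf rest es₂ := by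
          show used + (p * ((0:Nat):Int) + pvUsedOf rest es₂) = _
          push_cast
          ring
        rw [hred] at h1 h2 h3 ⊢
        rw [hredu] at h3
        exact le_max_of_le_left (i1c es₂ hcaps₂ h1 h2 h3)
      · have he1 : 1 ≤ e := by omega
        have hprodEq : prod * pvProdOf ((p, c) :: rest) (e :: es₂)
            = prod * p * pvProdOf ((p, c - 1) :: rest) ((e - 1) :: es₂) := by
          show prod * (p ^ e * pvProdOf rest es₂) = prod * p * (p ^ (e - 1) * pvProdOf rest es₂)
          have : p ^ e = p ^ (e - 1) * p := by
            rw [← pow_succ]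
            congr 1
            omega
          rw [this]
          ring
        have husedEq : used + pvUsedOf ((p, c) :: rest) (e :: es₂)
            = used + p + pvUsedOf ((p, c - 1) :: rest) ((e - 1) :: es₂) := by
          show used + (p * (e:Int) + pvUsedOf rest es₂)
              = used + p + (p * ((e - 1 : Nat) : Int) + pvUsedOf rest es₂)
          have : ((e - 1 : Nat) : Int) = (e : Int) - 1 := by push_cast [Nat.cast_sub he1]; ring
          rw [this]
          ring
        rw [hprodEq] at h1 h2 h3 ⊢
        rw [husedEq] at h3
        refine le_max_of_le_right (i2c ((e - 1) :: es₂) ?_ h1 h2 h3)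
        exact List.forall₂_cons.2 ⟨by simp; omega, hcaps₂⟩
  | case6 p c rest prod used hlt hc ih1 =>
    intro hall hprod
    have hallr : ∀ pc ∈ rest, 2 ≤ pc.1 := fun pc hpc => hall pc (by simp [hpc])
    obtain ⟨i1a, i1b, i1c⟩ := ih1 hallr hprod
    have hval : pvDfs total lo ((p, c) :: rest) prod used = pvDfs total lo rest prod used := by
      rw [pvDfs]
      simp only [if_neg hlt, if_neg hc]
    rw [hval]
    refine ⟨i1a, ?_, ?_⟩
    · rcases i1b with h0 | ⟨es, hcaps, h1, h2, h3, h4⟩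
      · exact Or.inl h0
      · refine Or.inr ⟨0 :: es, List.forall₂_cons.2 ⟨by simp, hcaps⟩, ?_, ?_, ?_, ?_⟩ <;>
        · show _root_.id _
          simp only [pvProdOf, pvUsedOf, pow_zero, one_mul, Nat.cast_zero, mul_zero, zero_add, _root_.id]
          assumption
    · intro es hcaps h1 h2 h3
      obtain ⟨e, es₂, hcapE, hcaps₂, rfl⟩ : ∃ e es₂,
          e ≤ c.toNat ∧ pvCaps rest es₂ ∧ es = e :: es₂ := by
        cases hcaps with
        | cons hE hR => exact ⟨_, _, hE, hR, rfl⟩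
      have he : e = 0 := by omega
      subst he
      have hred : prod * pvProdOf ((p, c) :: rest) (0 :: es₂) = prod * pvProdOf rest es₂ := by
        show prod * (p ^ 0 * pvProdOf rest es₂) = _
        ring
      have hredu : used + pvUsedOf ((p, c) :: rest) (0 :: es₂) = used + pvUsedOf rest es₂ := by
        show used + (p * ((0:Nat):Int) + pvUsedOf rest es₂) = _
        push_cast
        ring
      rw [hred] at h1 h2 h3 ⊢
      rw [hredu] at h3
      exact i1c es₂ hcaps₂ h1 h2 h3

-- a fold of `if Q P then max acc P else acc` over a range computes the max (or the seed)
lemma pvFoldMax (Q : Int → Prop) [DecidablePred Q] :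
    ∀ (n : Nat) (lo hi a : Int), (hi - lo).toNat ≤ n →
      a ≤ (PySem.List.pyRange lo hi 1).foldl (fun acc P => if Q P then max acc P else acc) a
      ∧ ((PySem.List.pyRange lo hi 1).foldl (fun acc P => if Q P then max acc P else acc) a = a
          ∨ (Q ((PySem.List.pyRange lo hi 1).foldl (fun acc P => if Q P then max acc P else acc) a)
             ∧ lo ≤ (PySem.List.pyRange lo hi 1).foldl (fun acc P => if Q P then max acc P else acc) a
             ∧ (PySem.List.pyRange lo hi 1).foldl (fun acc P => if Q P then max acc P else acc) a < hi))
      ∧ ∀ P, lo ≤ P → P < hi → Q P →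
          P ≤ (PySem.List.pyRange lo hi 1).foldl (fun acc P => if Q P then max acc P else acc) a := by
  intro n
  induction n with
  | zero =>
    intro lo hi a h
    have hle : hi ≤ lo := by omega
    rw [PySem.List.pyRange_one_eq_nil hle]
    refine ⟨le_rfl, Or.inl rfl, ?_⟩
    intro P h1 h2 _
    omega
  | succ n ih =>
    intro lo hi a h
    by_cases hle : hi ≤ lo
    · rw [PySem.List.pyRange_one_eq_nil hle]
      refine ⟨le_rfl, Or.inl rfl, ?_⟩
      intro P h1 h2 _
      omega
    · have hlt : lo < hi := by omega
      rw [PySem.List.pyRange_one_cons hlt, List.foldl_cons]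
      obtain ⟨ih1, ih2, ih3⟩ := ih (lo + 1) hi (if Q lo then max a lo else a) (by omega)
      refine ⟨?_, ?_, ?_⟩
      · refine le_trans ?_ ih1
        split_ifs <;> omega
      · rcases ih2 with h0 | ⟨hq, h1, h2⟩
        · rw [h0]
          by_cases hQ : Q lo
          · rw [if_pos hQ]
            by_cases hal : lo ≤ a
            · left; omega
            · right
              have hm : max a lo = lo := by omega
              rw [hm]
              exact ⟨hQ, le_rfl, hlt⟩
          · rw [if_neg hQ]
            exact Or.inl rfl
        · exact Or.inr ⟨hq, by omega, h2⟩
      · intro P h1 h2 hQP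
        by_cases hPlo : lo + 1 ≤ P
        · exact ih3 P hPlo h2 hQP
        · have hP : P = lo := by omega
          subst hP
          refine le_trans ?_ ih1
          rw [if_pos hQP]
          omega

-- ===== VERDICT (by name: the statement is the Claim_ definition above) =====
theorem solution_spec : Claim_equal_solution := by
  intro hm _hdom hpre
  unfold Spec_solution solution solution_alt
  have htot : pvSumItems (PySem.Dict.mk hm) = (hm.map (fun kv => kv.1 * kv.2)).sum := rfl
  rw [htot]
  have hA : (PySem.List.pyRange (max 2 ((hm.map (fun kv => kv.1 * kv.2)).sum - 29940))
        ((hm.map (fun kv => kv.1 * kv.2)).sum + 1) 1).foldl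
      (fun ans P =>
        match pvFactorize P with
        | none => ans
        | some factors =>
          match pvValidate (PySem.Dict.mk hm) factors (PySem.Dict.mk hm) with
          | none => ans
          | some remaining => if pvSumItems remaining = P then max ans P else ans) 0
      = (PySem.List.pyRange (max 2 ((hm.map (fun kv => kv.1 * kv.2)).sum - 29940))
          ((hm.map (fun kv => kv.1 * kv.2)).sum + 1) 1).foldl
        (fun ans P =>
          if (pvPRIMES.foldl (pvBStep (PySem.Dict.mk hm)) (P, 0)).1 = 1 ∧
              (hm.map (fun kv => kv.1 * kv.2)).sum
                - (pvPRIMES.foldl (pvBStep (PySem.Dict.mk hm)) (P, 0)).2 = P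
          then max ans P else ans) 0 := by
    apply PySem.List.foldl_congr_mem
    intro acc x hx
    have hx2 : 2 ≤ x := by
      have := (PySem.List.mem_pyRange_one.1 hx).1
      omega
    exact pvStep_eq hm hpre acc x (by omega)
  rw [hA]
  have hfm := pvFoldMax
    (fun P => (pvPRIMES.foldl (pvBStep (PySem.Dict.mk hm)) (P, 0)).1 = 1 ∧
        (hm.map (fun kv => kv.1 * kv.2)).sum
          - (pvPRIMES.foldl (pvBStep (PySem.Dict.mk hm)) (P, 0)).2 = P)
    (((hm.map (fun kv => kv.1 * kv.2)).sum + 1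
        - max 2 ((hm.map (fun kv => kv.1 * kv.2)).sum - 29940)).toNat)
    (max 2 ((hm.map (fun kv => kv.1 * kv.2)).sum - 29940))
    ((hm.map (fun kv => kv.1 * kv.2)).sum + 1) 0 le_rfl
  beta_reduce at hfm
  obtain ⟨hA1, hA2, hA3⟩ := hfm
  have hpairs : ∀ pc ∈ pvPRIMES.map (fun p => (p, (PySem.Dict.mk hm).getD p 0)), 2 ≤ pc.1 := by
    intro pc hpc
    obtain ⟨p, hp, rfl⟩ := List.mem_map.1 hpc
    exact (pvPRIMES_facts p hp).1
  have hlo : (2:Int) ≤ max 2 ((hm.map (fun kv => kv.1 * kv.2)).sum - 29940) := le_max_left _ _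
  obtain ⟨hB1, hB2, hB3⟩ := pvDfs_spec ((hm.map (fun kv => kv.1 * kv.2)).sum)
    (max 2 ((hm.map (fun kv => kv.1 * kv.2)).sum - 29940))
    (pvPRIMES.map (fun p => (p, (PySem.Dict.mk hm).getD p 0))) 1 0 hpairs one_pos
  -- any accepted candidate of the window is bounded by the DFS value
  have htoB : ∀ P, max 2 ((hm.map (fun kv => kv.1 * kv.2)).sum - 29940) ≤ P →
      P < (hm.map (fun kv => kv.1 * kv.2)).sum + 1 →
      (pvPRIMES.foldl (pvBStep (PySem.Dict.mk hm)) (P, 0)).1 = 1 →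
      (hm.map (fun kv => kv.1 * kv.2)).sum
        - (pvPRIMES.foldl (pvBStep (PySem.Dict.mk hm)) (P, 0)).2 = P →
      P ≤ pvDfs ((hm.map (fun kv => kv.1 * kv.2)).sum)
        (max 2 ((hm.map (fun kv => kv.1 * kv.2)).sum - 29940))
        (pvPRIMES.map (fun p => (p, (PySem.Dict.mk hm).getD p 0))) 1 0 := by
    intro P h1 h2 q1 q2
    have hP : 0 < P := by omega
    obtain ⟨es, hcaps, hPeq, hsum⟩ :=
      pvBwd (PySem.Dict.mk hm) pvPRIMES pvPRIMES_facts pvPRIMES_nodup P 0 hP q1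
    have := hB3 es hcaps (by rw [one_mul, ← hPeq]; exact h1)
      (by rw [one_mul, ← hPeq]; omega)
      (by
        rw [one_mul, ← hPeq, zero_add]
        rw [hsum, zero_add] at q2
        exact q2)
    rw [one_mul, ← hPeq] at this
    exact this
  -- the DFS value, when nonzero, is an accepted candidate of the window
  rcases hB2 with hr2zero | ⟨es, hcaps, k1, k2, k3, k4⟩
  · -- DFS found nothing
    rw [hr2zero]
    rcases hA2 with h0 | ⟨⟨hq1, hq2⟩, hq3, hq4⟩
    · exact h0
    · exfalso
      have := htoB _ hq3 hq4 hq1 hq2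
      rw [hr2zero] at this
      omega
  · have hfold := pvFwd (PySem.Dict.mk hm) pvPRIMES pvPRIMES_facts pvPRIMES_nodup es hcaps 0
    rw [one_mul] at k1 k2 k3 k4
    have hq1 : (pvPRIMES.foldl (pvBStep (PySem.Dict.mk hm))
        (pvProdOf (pvPRIMES.map (fun p => (p, (PySem.Dict.mk hm).getD p 0))) es, 0)).1 = 1 := by
      rw [hfold]
    have hq2 : (hm.map (fun kv => kv.1 * kv.2)).sum
        - (pvPRIMES.foldl (pvBStep (PySem.Dict.mk hm))
            (pvProdOf (pvPRIMES.map (fun p => (p, (PySem.Dict.mk hm).getD p 0))) es, 0)).2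
        = pvProdOf (pvPRIMES.map (fun p => (p, (PySem.Dict.mk hm).getD p 0))) es := by
      rw [hfold]
      rw [zero_add] at k3 ⊢
      exact k3
    have hub := hA3 _ k1 (by omega) ⟨hq1, hq2⟩
    rw [← k4] at hub
    rcases hA2 with h0 | ⟨⟨hq1', hq2'⟩, hq3', hq4'⟩
    · exfalso
      rw [h0] at hub
      have h2r : (2:Int) ≤ pvDfs ((hm.map (fun kv => kv.1 * kv.2)).sum)
          (max 2 ((hm.map (fun kv => kv.1 * kv.2)).sum - 29940))
          (pvPRIMES.map (fun p => (p, (PySem.Dict.mk hm).getD p 0))) 1 0 := by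
        rw [k4]
        omega
      omega
    · have hlb := htoB _ hq3' hq4' hq1' hq2'
      omega
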